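-- pv_equiv track=rewrite | github.com/specmatic/labs-tests | rebuild_reports.py | filter_labs
-- ===== SOURCE A (Python) =====
-- def filter_labs(all_labs: list[str], selected_labs: list[str] | None) -> list[str]:
--     if not selected_labs:
--         return all_labs
--     selected_set = set(selected_labs)
--     invalid = sorted(selected_set - set(all_labs))
--     if invalid:
--         raise SystemExit(f"Unknown lab snapshot(s): {', '.join(invalid)}")
--     return [lab for lab in all_labs if lab in selected_set]
-- ===== SOURCE B (Python) =====
-- def filter_labs(all_labs: list[str], selected_labs: list[str] | None) -> list[str]:
--     if not selected_labs:
--         return all_labs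
--     sel_sorted = sorted(selected_labs)
--     all_sorted = sorted(all_labs)
--     missing = _merge_missing(sel_sorted, all_sorted)
--     if missing:
--         raise SystemExit(f"Unknown lab snapshot(s): {', '.join(missing)}")
--     return [lab for lab in all_labs if _bsearch(sel_sorted, lab)]
--
--
-- def _merge_missing(sel, have):
--     """Two-pointer merge of two sorted lists: the elements of sel absent from have."""
--     missing = []
--     i = j = 0
--     while i < len(sel):
--         if j < len(have) and have[j] < sel[i]:
--             j += 1
--         elif j < len(have) and have[j] == sel[i]:
--             i += 1
--         else:
--             missing.append(sel[i])
--             i += 1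
--     return missing
--
--
-- def _bsearch(xs, x):
--     """Binary search for membership of x in the sorted list xs."""
--     lo, hi = 0, len(xs)
--     while lo < hi:
--         mid = (lo + hi) // 2
--         if xs[mid] < x:
--             lo = mid + 1
--         elif x < xs[mid]:
--             hi = mid
--         else:
--             return True
--     return False
-- ===== Notes on version B (the rewrite author's own statement) =====
-- stated objective: alternative
-- what changed: Replaces A's hash-set machinery (set difference for validation, set-membership filter) with a comparison-based algorithm using no sets at all: sort both lists, find the missing selected labs by a two-pointer merge of the two sorted lists, and filter all_labs by binary search over the sorted selection.
import Mathlib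
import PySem

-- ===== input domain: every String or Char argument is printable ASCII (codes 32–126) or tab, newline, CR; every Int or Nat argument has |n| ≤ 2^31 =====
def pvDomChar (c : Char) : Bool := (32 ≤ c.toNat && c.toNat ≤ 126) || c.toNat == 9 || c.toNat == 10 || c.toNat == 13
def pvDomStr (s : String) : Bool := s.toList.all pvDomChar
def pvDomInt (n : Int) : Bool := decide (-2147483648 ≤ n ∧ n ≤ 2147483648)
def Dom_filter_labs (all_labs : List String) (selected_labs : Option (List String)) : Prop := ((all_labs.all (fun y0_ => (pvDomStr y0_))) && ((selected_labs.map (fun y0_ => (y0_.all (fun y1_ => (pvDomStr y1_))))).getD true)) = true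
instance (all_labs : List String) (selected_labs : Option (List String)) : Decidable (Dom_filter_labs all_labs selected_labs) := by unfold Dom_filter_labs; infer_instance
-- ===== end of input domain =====

-- B replaces A's hash-set machinery with a comparison-based algorithm using no sets: sort both
-- lists, find missing selected labs by a two-pointer merge of the sorted lists, and filter
-- all_labs by binary search over the sorted selection. Return value only is compared.

-- ===== PORT A =====
def filter_labs (all_labs : List String) (selected_labs : Option (List String)) : List String :=
  match selected_labs with
  | none => all_labs
  | some sel =>
    if sel.isEmpty then all_labs
    else
      let selected_set : PySem.Set String := PySem.Set.ofList sel
      let invalid := PySem.List.sorted (PySem.Set.diff selected_set (PySem.Set.ofList all_labs)) (fun x => x) false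
      if invalid.isEmpty then
        all_labs.filter (fun lab => PySem.Set.contains selected_set lab)
      else []  -- Python raises SystemExit here; excluded by Pre_filter_labs

-- ===== PORT B =====
-- _merge_missing from Source B: the while loop over indices i (into sel) and j (into have)
-- becomes structural recursion on the two suffixes sel[i:], have[j:].
def mergeMissing : List String → List String → List String
  | [], _ => []
  | s :: ss, [] => s :: mergeMissing ss []
  | s :: ss, h :: hh =>
    if h < s then mergeMissing (s :: ss) hh
    else if h = s then mergeMissing ss (h :: hh)
    else s :: mergeMissing ss (h :: hh)
termination_by sel hav => sel.length + hav.length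

-- _bsearch's while loop; xs.getD mid "" is xs[mid] (mid is always in range when hi ≤ len xs).
def bsearchGo (xs : List String) (x : String) (lo hi : Nat) : Bool :=
  if _h : lo < hi then
    if xs.getD ((lo + hi) / 2) "" < x then bsearchGo xs x ((lo + hi) / 2 + 1) hi
    else if x < xs.getD ((lo + hi) / 2) "" then bsearchGo xs x lo ((lo + hi) / 2)
    else true
  else false
termination_by hi - lo
decreasing_by all_goals omega

def bsearch (xs : List String) (x : String) : Bool := bsearchGo xs x 0 xs.length

def filter_labs_alt (all_labs : List String) (selected_labs : Option (List String)) : List String :=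
  match selected_labs with
  | none => all_labs
  | some sel =>
    if sel.isEmpty then all_labs
    else
      let sel_sorted := PySem.List.sorted sel (fun s => s) false
      let all_sorted := PySem.List.sorted all_labs (fun s => s) false
      let missing := mergeMissing sel_sorted all_sorted
      if missing.isEmpty then
        all_labs.filter (fun lab => bsearch sel_sorted lab)
      else []  -- Python raises SystemExit here; excluded by Pre_filter_labs

-- ===== PRECONDITION & SPEC =====
-- Pre_ excludes exactly the inputs where A raises SystemExit: a non-empty selection
-- containing a name absent from all_labs.
def Pre_filter_labs (all_labs : List String) (selected_labs : Option (List String)) : Prop :=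
  (match selected_labs with
   | none => true
   | some sel => sel.all (fun x => all_labs.contains x)) = true
instance (all_labs : List String) (selected_labs : Option (List String)) : Decidable (Pre_filter_labs all_labs selected_labs) := by unfold Pre_filter_labs; infer_instance

def pvWitness_filter_labs : List String × Option (List String) := (["a", "b", "a"], some ["b"])

def Spec_filter_labs (all_labs : List String) (selected_labs : Option (List String)) (out : List String) : Prop := out = filter_labs_alt all_labs selected_labs
instance (all_labs : List String) (selected_labs : Option (List String)) (out : List String) : Decidable (Spec_filter_labs all_labs selected_labs out) := by unfold Spec_filter_labs; infer_instance

-- ===== CLAIM (what is proved, stated in full; the proofs are below) =====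
def Claim_equal_filter_labs : Prop := ∀ (all_labs : List String) (selected_labs : Option (List String)), Dom_filter_labs all_labs selected_labs → Pre_filter_labs all_labs selected_labs → Spec_filter_labs all_labs selected_labs (filter_labs all_labs selected_labs)

-- ===== LEMMAS AND PROOFS =====

-- The merge of two ≤-sorted lists finds nothing missing when sel ⊆ have.
theorem mergeMissing_eq_nil : ∀ (sel hav : List String),
    sel.Pairwise (· ≤ ·) → hav.Pairwise (· ≤ ·) → (∀ x ∈ sel, x ∈ hav) →
    mergeMissing sel hav = [] := by
  intro sel hav
  induction sel, hav using mergeMissing.induct with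
  | case1 hav => intro _ _ _; simp [mergeMissing]
  | case2 s ss ih =>
    intro _ _ hsub
    exact absurd (hsub s List.mem_cons_self) List.not_mem_nil
  | case3 s ss h hh hlt ih =>
    intro hsel hhav hsub
    simp only [mergeMissing]
    rw [if_pos hlt]
    refine ih hsel (hhav.sublist (List.sublist_cons_self _ _)) ?_
    intro x hx
    have hsx : s ≤ x := by
      rcases List.mem_cons.mp hx with rfl | hx'
      · exact le_refl _
      · exact (List.pairwise_cons.mp hsel).1 x hx'
    rcases List.mem_cons.mp (hsub x hx) with rfl | hx'
    · exact absurd (lt_of_lt_of_le hlt hsx) (lt_irrefl x)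
    · exact hx'
  | case4 ss h hh hnlt ih =>
    intro hsel hhav hsub
    simp only [mergeMissing]
    rw [if_neg hnlt]
    simp only [if_true]
    exact ih (hsel.sublist (List.sublist_cons_self _ _)) hhav
      (fun x hx => hsub x (List.mem_cons_of_mem _ hx))
  | case5 s ss h hh hnlt hne ih =>
    intro hsel hhav hsub
    exfalso
    have hsh : s < h := lt_of_le_of_ne (not_lt.mp hnlt) (fun e => hne e.symm)
    rcases List.mem_cons.mp (hsub s List.mem_cons_self) with rfl | hs'
    · exact lt_irrefl s hsh
    · exact absurd (lt_of_lt_of_le hsh ((List.pairwise_cons.mp hhav).1 s hs')) (lt_irrefl s)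

-- Binary search is sound: a hit is an element of xs.
theorem bsearchGo_sound (xs : List String) (x : String) : ∀ (lo hi : Nat),
    hi ≤ xs.length → bsearchGo xs x lo hi = true → x ∈ xs := by
  intro lo hi
  induction lo, hi using bsearchGo.induct xs x with
  | case1 lo hi hlt hvx ih =>
    intro hhi hgo
    rw [bsearchGo, dif_pos hlt, if_pos hvx] at hgo
    exact ih hhi hgo
  | case2 lo hi hlt hnvx hxv ih =>
    intro hhi hgo
    rw [bsearchGo, dif_pos hlt, if_neg hnvx, if_pos hxv] at hgo
    exact ih (by omega) hgo
  | case3 lo hi hlt hnvx hnxv =>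
    intro hhi _
    have hmid : (lo + hi) / 2 < xs.length := by omega
    have hveq : xs.getD ((lo + hi) / 2) "" = xs[(lo + hi) / 2] :=
      List.getD_eq_getElem xs "" hmid
    have hx : x = xs[(lo + hi) / 2] := by
      rw [← hveq]
      exact le_antisymm (not_lt.mp hnvx) (not_lt.mp hnxv)
    rw [hx]
    exact List.getElem_mem hmid
  | case4 lo hi hnlt =>
    intro _ hgo
    rw [bsearchGo, dif_neg hnlt] at hgo
    exact absurd hgo (by simp)

-- Binary search is complete on a ≤-sorted list.
theorem bsearchGo_complete (xs : List String) (x : String)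
    (hsort : xs.Pairwise (· ≤ ·)) : ∀ (lo hi : Nat), hi ≤ xs.length →
    ∀ (i : Nat) (hi' : i < xs.length), lo ≤ i → i < hi → xs[i] = x →
    bsearchGo xs x lo hi = true := by
  intro lo hi
  induction lo, hi using bsearchGo.induct xs x with
  | case1 lo hi hlt hvx ih =>
    intro hhi i hi' hloi hihi hxi
    have hmid : (lo + hi) / 2 < xs.length := by omega
    have hveq : xs.getD ((lo + hi) / 2) "" = xs[(lo + hi) / 2] :=
      List.getD_eq_getElem xs "" hmid
    have h1 : xs[(lo + hi) / 2] < x := hveq ▸ hvx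
    have hmi : (lo + hi) / 2 < i := by
      rcases Nat.lt_trichotomy i ((lo + hi) / 2) with hl | he | hg
      · exfalso
        have h2 := List.pairwise_iff_getElem.mp hsort i _ hi' hmid hl
        rw [hxi] at h2
        exact absurd (lt_of_le_of_lt h2 h1) (lt_irrefl x)
      · exfalso
        subst he
        rw [hxi] at h1
        exact lt_irrefl x h1
      · exact hg
    rw [bsearchGo, dif_pos hlt, if_pos hvx]
    exact ih hhi i hi' hmi hihi hxi
  | case2 lo hi hlt hnvx hxv ih =>
    intro hhi i hi' hloi hihi hxi
    have hmid : (lo + hi) / 2 < xs.length := by omega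
    have hveq : xs.getD ((lo + hi) / 2) "" = xs[(lo + hi) / 2] :=
      List.getD_eq_getElem xs "" hmid
    have h1 : x < xs[(lo + hi) / 2] := hveq ▸ hxv
    have him : i < (lo + hi) / 2 := by
      rcases Nat.lt_trichotomy i ((lo + hi) / 2) with hl | he | hg
      · exact hl
      · exfalso
        subst he
        rw [hxi] at h1
        exact lt_irrefl x h1
      · exfalso
        have h2 := List.pairwise_iff_getElem.mp hsort _ i hmid hi' hg
        rw [hxi] at h2
        exact absurd (lt_of_lt_of_le h1 h2) (lt_irrefl x)
    rw [bsearchGo, dif_pos hlt, if_neg hnvx, if_pos hxv]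
    exact ih (by omega) i hi' hloi him hxi
  | case3 lo hi hlt hnvx hnxv =>
    intro _ _ _ _ _ _
    rw [bsearchGo, dif_pos hlt, if_neg hnvx, if_neg hnxv]
  | case4 lo hi hnlt =>
    intro _ i _ hloi hihi _
    omega

theorem bsearch_iff_mem (xs : List String) (x : String)
    (hsort : xs.Pairwise (· ≤ ·)) : bsearch xs x = true ↔ x ∈ xs := by
  constructor
  · exact bsearchGo_sound xs x 0 xs.length (le_refl _)
  · intro hx
    rcases List.getElem_of_mem hx with ⟨i, hi, hxi⟩
    exact bsearchGo_complete xs x hsort 0 xs.length (le_refl _) i hi (Nat.zero_le _) hi hxi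

-- sorted(xs) with the identity key is ≤-sorted.
theorem sorted_id_pairwise (xs : List String) :
    (PySem.List.sorted xs (fun s => s) false).Pairwise (· ≤ ·) :=
  PySem.List.sorted_pairwise xs (fun s => s)

theorem filter_labs_spec : Claim_equal_filter_labs := by
  unfold Claim_equal_filter_labs
  intro all_labs selected_labs _ hpre
  unfold Spec_filter_labs Pre_filter_labs at *
  cases selected_labs with
  | none => rfl
  | some sel =>
    simp only [filter_labs, filter_labs_alt]
    by_cases hs : sel.isEmpty = true
    · rw [if_pos hs, if_pos hs]
    · rw [if_neg hs, if_neg hs]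
      have hsub : ∀ x ∈ sel, x ∈ all_labs := by
        intro x hx
        have := List.all_eq_true.mp hpre x hx
        simpa using this
      -- A's invalid set is empty
      have hdiff : PySem.Set.diff (PySem.Set.ofList sel) (PySem.Set.ofList all_labs) = [] := by
        apply List.eq_nil_iff_forall_not_mem.mpr
        intro x hx
        have hx' := (PySem.Set.mem_diff _ _ _).mp hx
        exact hx'.2 ((PySem.Set.mem_ofList _ _).mpr (hsub x ((PySem.Set.mem_ofList _ _).mp hx'.1)))
      -- B's merge finds nothing missing
      have hmiss : mergeMissing (PySem.List.sorted sel (fun s => s) false)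
          (PySem.List.sorted all_labs (fun s => s) false) = [] := by
        apply mergeMissing_eq_nil _ _ (sorted_id_pairwise sel) (sorted_id_pairwise all_labs)
        intro x hx
        exact (PySem.List.mem_sorted _ _ _ _).mpr
          (hsub x ((PySem.List.mem_sorted _ _ _ _).mp hx))
      rw [hdiff, hmiss]
      have hsort0 : PySem.List.sorted ([] : List String) (fun x => x) false = [] := rfl
      rw [hsort0]
      simp only [List.isEmpty_nil, if_true]
      apply List.filter_congr
      intro lab _
      rw [Bool.eq_iff_iff]
      rw [PySem.Set.contains_iff, PySem.Set.mem_ofList,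
        bsearch_iff_mem _ _ (sorted_id_pairwise sel), PySem.List.mem_sorted]
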